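-- pv_equiv track=rewrite | github.com/Parkbyounghyo/nori-ai-java | nori-collector/collectors/javadoc_collector.py | _package_to_path
-- ===== SOURCE A (Python) =====
-- def _package_to_path(package: str) -> str:
--     """패키지명 → URL 경로 변환 (java.util → java.base/java/util)"""
--     # Java 17 모듈 매핑
--     module_map = {
--         "java.lang": "java.base",
--         "java.util": "java.base",
--         "java.io": "java.base",
--         "java.nio": "java.base",
--         "java.net": "java.base",
--         "java.time": "java.base",
--         "java.math": "java.base",
--         "java.text": "java.base",
--         "java.sql": "java.sql",
--     }
--     # 가장 구체적인 매칭 찾기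
--     module = "java.base"
--     for pkg_prefix, mod in module_map.items():
--         if package.startswith(pkg_prefix):
--             module = mod
--
--     pkg_path = package.replace(".", "/")
--     return f"{module}/{pkg_path}"
-- ===== SOURCE B (Python) =====
-- def _package_to_path(package: str) -> str:
--     """패키지명 → URL 경로 변환 (java.util → java.base/java/util)"""
--     # Every prefix in A's table maps to "java.base" except "java.sql",
--     # and the prefixes are pairwise non-overlapping, so one test suffices.
--     module = "java.sql" if package.startswith("java.sql") else "java.base"
--     return f"{module}/{package.replace('.', '/')}"
-- ===== Notes on version B (the rewrite author's own statement) =====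
-- stated objective: simpler
-- what changed: Replaced the 9-entry prefix table and the last-match scan loop with one closed-form test: module is 'java.sql' iff the package starts with 'java.sql', else the default 'java.base'.
import Mathlib
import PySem

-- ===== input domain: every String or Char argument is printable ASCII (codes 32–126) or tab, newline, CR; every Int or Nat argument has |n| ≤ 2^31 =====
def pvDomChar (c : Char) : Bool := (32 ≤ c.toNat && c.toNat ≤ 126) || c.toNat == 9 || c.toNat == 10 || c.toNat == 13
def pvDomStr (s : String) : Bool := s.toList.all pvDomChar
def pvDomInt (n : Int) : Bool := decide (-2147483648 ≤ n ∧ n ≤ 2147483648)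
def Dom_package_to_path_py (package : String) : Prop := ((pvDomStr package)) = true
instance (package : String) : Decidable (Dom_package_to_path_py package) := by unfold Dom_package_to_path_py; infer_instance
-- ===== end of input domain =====

-- B replaces A's 9-entry prefix table and last-match scan with one closed-form test (simpler, same result).

-- ===== PORT A =====
-- the dict literal, as an insertion-ordered association list (keys are distinct literals)
def pvModuleMap : PySem.Dict String String :=
  PySem.Dict.ofList
    [("java.lang", "java.base"), ("java.util", "java.base"), ("java.io", "java.base"),
     ("java.nio", "java.base"), ("java.net", "java.base"), ("java.time", "java.base"),
     ("java.math", "java.base"), ("java.text", "java.base"), ("java.sql", "java.sql")]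

def package_to_path_py (package : String) : String :=
  -- for pkg_prefix, mod in module_map.items(): if package.startswith(pkg_prefix): module = mod
  let module := pvModuleMap.items.foldl
    (fun module pm => if PySem.Str.startswith package pm.1 then pm.2 else module) "java.base"
  let pkg_path := PySem.Str.replace package "." "/"
  module ++ "/" ++ pkg_path

-- ===== PORT B =====
def package_to_path_py_alt (package : String) : String :=
  let module := if PySem.Str.startswith package "java.sql" then "java.sql" else "java.base"
  module ++ "/" ++ PySem.Str.replace package "." "/"

-- ===== PRECONDITION & SPEC =====
def Spec_package_to_path_py (package : String) (out : String) : Prop := out = package_to_path_py_alt package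
instance (package : String) (out : String) : Decidable (Spec_package_to_path_py package out) := by unfold Spec_package_to_path_py; infer_instance

-- ===== CLAIM (what is proved, stated in full; the proofs are below) =====
def Claim_equal_package_to_path_py : Prop := ∀ (package : String), Dom_package_to_path_py package → Spec_package_to_path_py package (package_to_path_py package)

-- ===== LEMMAS AND PROOFS =====

-- ===== VERDICT (by name: the statement is the Claim_ definition above) =====
theorem pvModuleMap_items : pvModuleMap.items =
    [("java.lang", "java.base"), ("java.util", "java.base"), ("java.io", "java.base"),
     ("java.nio", "java.base"), ("java.net", "java.base"), ("java.time", "java.base"),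
     ("java.math", "java.base"), ("java.text", "java.base"), ("java.sql", "java.sql")] := by
  decide

theorem package_to_path_py_spec : Claim_equal_package_to_path_py := by
  intro package _
  unfold Spec_package_to_path_py package_to_path_py package_to_path_py_alt
  rw [pvModuleMap_items]
  simp [List.foldl]
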